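-- pv_equiv track=rewrite | github.com/TereseWang/SnarlGame | tests/Level/testLevel.py | returnNonWallAndDoorTiles
-- ===== SOURCE A (Python) =====
-- def returnNonWallAndDoorTiles(layout, originX, originY):
--     noneWallTiles = []
--     doorTiles = []
--     for row in range(len(layout)):
--         for col  in range(len(layout[row])):
--             """if it contains a 1 or 2, it will be non wall tiles"""
--             if layout[row][col] == 1 or layout[row][col] == 2:
--                 noneWallTiles += [(col + originY, row + originX)]
--             """if it contains 2, then it will be door tiles"""
--             if layout[row][col] == 2:
--                 doorTiles += [(col + originY, row + originX)]
--     return [noneWallTiles, doorTiles]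
-- ===== SOURCE B (Python) =====
-- def returnNonWallAndDoorTiles(layout, originX, originY):
--     noneWallTiles = [(c + originY, r + originX)
--                      for r, row in enumerate(layout)
--                      for c, v in enumerate(row)
--                      if v == 1 or v == 2]
--     doorTiles = [(c + originY, r + originX)
--                  for r, row in enumerate(layout)
--                  for c, v in enumerate(row)
--                  if v == 2]
--     return [noneWallTiles, doorTiles]
-- ===== Notes on version B (the rewrite author's own statement) =====
-- stated objective: idiomatic
-- what changed: Replaced A's single index-driven nested loop that grows two accumulators in lockstep with two independent row-major comprehensions over enumerate, one per result list.
import Mathlib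
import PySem

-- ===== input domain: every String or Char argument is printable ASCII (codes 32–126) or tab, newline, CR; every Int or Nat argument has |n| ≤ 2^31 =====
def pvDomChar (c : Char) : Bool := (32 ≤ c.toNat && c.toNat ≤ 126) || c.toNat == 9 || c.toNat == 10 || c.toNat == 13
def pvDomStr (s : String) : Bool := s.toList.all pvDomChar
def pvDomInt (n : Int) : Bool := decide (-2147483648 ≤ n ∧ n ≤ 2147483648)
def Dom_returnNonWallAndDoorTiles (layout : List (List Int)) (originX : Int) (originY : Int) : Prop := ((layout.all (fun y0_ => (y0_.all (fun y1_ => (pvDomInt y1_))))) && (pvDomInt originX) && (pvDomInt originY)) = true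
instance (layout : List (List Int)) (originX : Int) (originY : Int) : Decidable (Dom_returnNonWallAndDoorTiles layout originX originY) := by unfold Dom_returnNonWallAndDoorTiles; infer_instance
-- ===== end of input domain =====

-- B builds the two tile lists by two independent row-major comprehensions over enumerate
-- instead of A's single index-driven nested loop growing both accumulators in lockstep (idiomatic; same cost).

-- ===== PORT A =====
def returnNonWallAndDoorTiles (layout : List (List Int)) (originX : Int) (originY : Int) : List (List (Int × Int)) :=
  let res := (PySem.List.pyRange 0 (layout.length : Int) 1).foldl
    (fun (acc : List (Int × Int) × List (Int × Int)) row =>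
      let rowL := PySem.List.pyGetD layout row []
      (PySem.List.pyRange 0 (rowL.length : Int) 1).foldl
        (fun acc col =>
          let v := PySem.List.pyGetD rowL col 0
          let acc1 := if v = 1 ∨ v = 2 then (acc.1 ++ [(col + originY, row + originX)], acc.2) else acc
          if v = 2 then (acc1.1, acc1.2 ++ [(col + originY, row + originX)]) else acc1)
        acc)
    ([], [])
  [res.1, res.2]

-- ===== PORT B =====
def returnNonWallAndDoorTiles_alt (layout : List (List Int)) (originX : Int) (originY : Int) : List (List (Int × Int)) :=
  let noneWallTiles := (PySem.List.enumerate layout 0).flatMap (fun rp =>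
    (PySem.List.enumerate rp.2 0).filterMap (fun cp =>
      if cp.2 = 1 ∨ cp.2 = 2 then some (cp.1 + originY, rp.1 + originX) else none))
  let doorTiles := (PySem.List.enumerate layout 0).flatMap (fun rp =>
    (PySem.List.enumerate rp.2 0).filterMap (fun cp =>
      if cp.2 = 2 then some (cp.1 + originY, rp.1 + originX) else none))
  [noneWallTiles, doorTiles]

-- ===== PRECONDITION & SPEC =====
def Spec_returnNonWallAndDoorTiles (layout : List (List Int)) (originX : Int) (originY : Int) (out : List (List (Int × Int))) : Prop := out = returnNonWallAndDoorTiles_alt layout originX originY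
instance (layout : List (List Int)) (originX : Int) (originY : Int) (out : List (List (Int × Int))) : Decidable (Spec_returnNonWallAndDoorTiles layout originX originY out) := by unfold Spec_returnNonWallAndDoorTiles; infer_instance

-- ===== CLAIM (what is proved, stated in full; the proofs are below) =====
def Claim_equal_returnNonWallAndDoorTiles : Prop := ∀ (layout : List (List Int)) (originX : Int) (originY : Int), Dom_returnNonWallAndDoorTiles layout originX originY → Spec_returnNonWallAndDoorTiles layout originX originY (returnNonWallAndDoorTiles layout originX originY)

-- ===== LEMMAS AND PROOFS =====

-- 'for i in range(len(xs)): … i … xs[i] …' is a fold over enumerate(xs)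
theorem pv_bridge {α β : Type} (g : β → Int → α → β) (d : α) :
    ∀ (l pre : List α) (acc : β),
    (PySem.List.pyRange (pre.length : Int) ((pre.length : Int) + (l.length : Int)) 1).foldl
      (fun acc j => g acc j (PySem.List.pyGetD (pre ++ l) j d)) acc
    = (PySem.List.enumerate l (pre.length : Int)).foldl (fun acc p => g acc p.1 p.2) acc
  | [], pre, acc => by
      simp [PySem.List.pyRange_one_eq_nil, PySem.List.enumerate_nil]
  | x :: t, pre, acc => by
      rw [PySem.List.pyRange_one_cons (by push_cast [List.length_cons]; omega)]
      rw [PySem.List.enumerate_cons]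
      simp only [List.foldl_cons]
      have hget : PySem.List.pyGetD (pre ++ x :: t) (pre.length : Int) d = x := by
        simp [PySem.List.pyGetD_natCast, List.getD]
      rw [hget]
      have h := pv_bridge g d t (pre ++ [x]) (g acc (pre.length : Int) x)
      rw [List.append_assoc, List.singleton_append] at h
      simp only [List.length_append, List.length_cons, List.length_nil] at h
      have e1 : ((pre.length : Int) + ((t.length : Nat) + 1 : Nat)) = ((pre.length + (0 + 1) : Nat) : Int) + (t.length : Int) := by
        push_cast; ring
      have e2 : ((pre.length : Int) + 1) = ((pre.length + (0 + 1) : Nat) : Int) := by push_cast; ring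
      rw [List.length_cons, e1, e2]
      exact h

theorem pv_bridge0 {α β : Type} (g : β → Int → α → β) (d : α) (l : List α) (acc : β) :
    (PySem.List.pyRange 0 (l.length : Int) 1).foldl
      (fun acc j => g acc j (PySem.List.pyGetD l j d)) acc
    = (PySem.List.enumerate l 0).foldl (fun acc p => g acc p.1 p.2) acc := by
  have h := pv_bridge g d l [] acc
  simpa using h

-- A's inner loop over one row appends exactly the two filterMaps of B
theorem pv_inner (oX oY r : Int) :
    ∀ (l : List Int) (s : Int) (acc : List (Int × Int) × List (Int × Int)),
    (PySem.List.enumerate l s).foldl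
      (fun acc p =>
        let acc1 := if p.2 = 1 ∨ p.2 = 2 then (acc.1 ++ [(p.1 + oY, r + oX)], acc.2) else acc
        if p.2 = 2 then (acc1.1, acc1.2 ++ [(p.1 + oY, r + oX)]) else acc1) acc
    = (acc.1 ++ (PySem.List.enumerate l s).filterMap
          (fun cp => if cp.2 = 1 ∨ cp.2 = 2 then some (cp.1 + oY, r + oX) else none),
       acc.2 ++ (PySem.List.enumerate l s).filterMap
          (fun cp => if cp.2 = 2 then some (cp.1 + oY, r + oX) else none))
  | [], s, acc => by simp [PySem.List.enumerate_nil]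
  | x :: t, s, acc => by
      rw [PySem.List.enumerate_cons]
      simp only [List.foldl_cons, List.filterMap_cons]
      rw [pv_inner oX oY r t (s + 1)]
      split_ifs <;> simp

-- a fold that appends two per-element blocks is the pair of flatMaps
theorem pv_outer {γ : Type} (f1 f2 : γ → List (Int × Int)) :
    ∀ (l : List γ) (acc : List (Int × Int) × List (Int × Int)),
    l.foldl (fun acc p => (acc.1 ++ f1 p, acc.2 ++ f2 p)) acc
    = (acc.1 ++ l.flatMap f1, acc.2 ++ l.flatMap f2)
  | [], acc => by simp
  | x :: t, acc => by
      simp only [List.foldl_cons, List.flatMap_cons]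
      rw [pv_outer f1 f2 t]
      simp

-- ===== VERDICT (by name: the statement is the Claim_ definition above) =====
theorem returnNonWallAndDoorTiles_spec : Claim_equal_returnNonWallAndDoorTiles := by
  intro layout originX originY _
  unfold Spec_returnNonWallAndDoorTiles returnNonWallAndDoorTiles returnNonWallAndDoorTiles_alt
  rw [pv_bridge0 (fun acc row rowL =>
      (PySem.List.pyRange 0 (rowL.length : Int) 1).foldl
        (fun acc col =>
          let v := PySem.List.pyGetD rowL col 0
          let acc1 := if v = 1 ∨ v = 2 then (acc.1 ++ [(col + originY, row + originX)], acc.2) else acc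
          if v = 2 then (acc1.1, acc1.2 ++ [(col + originY, row + originX)]) else acc1)
        acc) ([] : List Int)]
  have hbody : ∀ (p : Int × List Int) (acc : List (Int × Int) × List (Int × Int)),
      (PySem.List.pyRange 0 (p.2.length : Int) 1).foldl
        (fun acc col =>
          let v := PySem.List.pyGetD p.2 col 0
          let acc1 := if v = 1 ∨ v = 2 then (acc.1 ++ [(col + originY, p.1 + originX)], acc.2) else acc
          if v = 2 then (acc1.1, acc1.2 ++ [(col + originY, p.1 + originX)]) else acc1)
        acc
      = (acc.1 ++ (PySem.List.enumerate p.2 0).filterMap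
            (fun cp => if cp.2 = 1 ∨ cp.2 = 2 then some (cp.1 + originY, p.1 + originX) else none),
         acc.2 ++ (PySem.List.enumerate p.2 0).filterMap
            (fun cp => if cp.2 = 2 then some (cp.1 + originY, p.1 + originX) else none)) := by
    intro p acc
    rw [pv_bridge0 (fun acc col v =>
        let acc1 := if v = 1 ∨ v = 2 then (acc.1 ++ [(col + originY, p.1 + originX)], acc.2) else acc
        if v = 2 then (acc1.1, acc1.2 ++ [(col + originY, p.1 + originX)]) else acc1) (0 : Int)]
    exact pv_inner originX originY p.1 p.2 0 acc
  simp only [hbody]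
  rw [pv_outer]
  simp
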